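-- pv_equiv track=rewrite | github.com/boonsup/hgst-e7 | simulation/positive_control.py | count_mixed_triads
-- ===== SOURCE A (Python) =====
-- from itertools import combinations
-- from typing import Dict, Tuple, List
--
-- def count_mixed_triads(
--     sign: Dict[Tuple[int, int], int],
--     n_sites: int,
-- ) -> Tuple[int, int]:
--     """
--     Count MIXED triads over all ordered triples (i < j, k distinct).
--
--     A triad (i, j, k) is considered whenever ALL THREE directed edges
--     (i→j), (i→k), (k→j) are present in `sign`.
--
--     Parameters
--     ----------
--     sign : dict  (src, tgt) → +1 or -1
--         Signed directed edge map (need not be symmetric).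
--     n_sites : int
--         Total number of sites (used only for the triple enumeration upper bound).
--
--     Returns
--     -------
--     (n_mixed, n_valid) : (int, int)
--         n_valid = triads where all three required edges exist.
--         n_mixed = those that are MIXED.
--     """
--     n_mixed = 0
--     n_valid = 0
--
--     # Enumerate all unordered pairs {i,j} and all k ≠ i,j.
--     # The role of "mediator" is always k; direct path is i→j.
--     for i, j in combinations(range(n_sites), 2):
--         for k in range(n_sites):
--             if k == i or k == j:
--                 continue
--             # Required edges: i→j (direct), i→k and k→j (mediated)
--             if (i, j) in sign and (i, k) in sign and (k, j) in sign:
--                 n_valid += 1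
--                 s_direct   = sign[(i, j)]
--                 s_mediated = sign[(i, k)] * sign[(k, j)]
--                 if s_direct != s_mediated:
--                     n_mixed += 1
--
--     return n_mixed, n_valid
-- ===== SOURCE B (Python) =====
-- def count_mixed_triads(sign, n_sites):
--     # Iterate only the existing edges (i, j) and the out-neighbours of i,
--     # instead of scanning all O(n^3) triples.
--     out_nbrs = {}
--     for (a, b) in sign:
--         out_nbrs.setdefault(a, []).append(b)
--     n_mixed = 0
--     n_valid = 0
--     for (i, j), s_direct in sign.items():
--         if 0 <= i and i < j and j < n_sites:
--             for k in out_nbrs[i]: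
--                 if k != i and k != j and 0 <= k and k < n_sites and (k, j) in sign:
--                     n_valid += 1
--                     if s_direct != sign[(i, k)] * sign[(k, j)]:
--                         n_mixed += 1
--     return n_mixed, n_valid
-- ===== Notes on version B (the rewrite author's own statement) =====
-- stated objective: faster
-- what changed: Instead of enumerating all O(n^3) ordered triples over range(n_sites), B iterates only the edges actually present in the dict as the direct pair (i,j) and, via an out-neighbour adjacency index built once, only the existing mediators k with (i,k) in sign, checking (k,j) by dict lookup.
import Mathlib
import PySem

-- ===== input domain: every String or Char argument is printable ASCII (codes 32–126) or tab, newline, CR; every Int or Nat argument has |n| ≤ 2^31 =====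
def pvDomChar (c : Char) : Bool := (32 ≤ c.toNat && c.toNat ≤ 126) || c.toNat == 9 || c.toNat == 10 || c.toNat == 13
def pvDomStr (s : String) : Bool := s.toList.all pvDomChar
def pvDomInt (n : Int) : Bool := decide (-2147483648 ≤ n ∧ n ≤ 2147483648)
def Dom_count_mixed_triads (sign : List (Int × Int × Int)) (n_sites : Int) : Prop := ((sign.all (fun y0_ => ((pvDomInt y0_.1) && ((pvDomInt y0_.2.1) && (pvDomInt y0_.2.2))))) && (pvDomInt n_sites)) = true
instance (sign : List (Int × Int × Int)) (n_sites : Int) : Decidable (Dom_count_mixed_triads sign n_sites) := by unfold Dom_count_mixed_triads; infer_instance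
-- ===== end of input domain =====

-- B iterates only the existing edges and the out-neighbours of each edge's source
-- (adjacency index built once) instead of scanning all O(n^3) triples; same return value.


-- ===== PORT A =====
-- the dict argument arrives as an association list; build the Python dict once (last write wins, as in Python)
def count_mixed_triads (sign : List (Int × Int × Int)) (n_sites : Int) : Int × Int :=
  let d : PySem.Dict (Int × Int) Int :=
    PySem.Dict.ofList (sign.map (fun t => ((t.1, t.2.1), t.2.2)))
  (PySem.List.combinations (PySem.List.pyRange 0 n_sites 1) 2).foldl
    (fun acc pr =>
      match pr with
      | [i, j] =>
        (PySem.List.pyRange 0 n_sites 1).foldl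
          (fun acc k =>
            if k = i ∨ k = j then acc
            else if d.contains (i, j) ∧ d.contains (i, k) ∧ d.contains (k, j) then
              let s_direct := d.getD (i, j) 0
              let s_mediated := d.getD (i, k) 0 * d.getD (k, j) 0
              (if s_direct ≠ s_mediated then acc.1 + 1 else acc.1, acc.2 + 1)
            else acc) acc
      | _ => acc)
    (0, 0)

-- ===== PORT B =====
def count_mixed_triads_alt (sign : List (Int × Int × Int)) (n_sites : Int) : Int × Int :=
  let d : PySem.Dict (Int × Int) Int :=
    PySem.Dict.ofList (sign.map (fun t => ((t.1, t.2.1), t.2.2)))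
  -- out_nbrs: for (a, b) in sign: out_nbrs.setdefault(a, []).append(b)
  let out_nbrs : PySem.Dict Int (List Int) :=
    d.keys.foldl (fun a p => a.modify p.1 [] (· ++ [p.2])) PySem.Dict.empty
  d.items.foldl
    (fun acc it =>
      if 0 ≤ it.1.1 ∧ it.1.1 < it.1.2 ∧ it.1.2 < n_sites then
        (out_nbrs.getD it.1.1 []).foldl
          (fun acc k =>
            if k ≠ it.1.1 ∧ k ≠ it.1.2 ∧ 0 ≤ k ∧ k < n_sites ∧ d.contains (k, it.1.2) then
              (if it.2 ≠ d.getD (it.1.1, k) 0 * d.getD (k, it.1.2) 0 then acc.1 + 1 else acc.1,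
               acc.2 + 1)
            else acc) acc
      else acc)
    (0, 0)

-- ===== PRECONDITION & SPEC =====
def Spec_count_mixed_triads (sign : List (Int × Int × Int)) (n_sites : Int) (out : Int × Int) : Prop := out = count_mixed_triads_alt sign n_sites
instance (sign : List (Int × Int × Int)) (n_sites : Int) (out : Int × Int) : Decidable (Spec_count_mixed_triads sign n_sites out) := by unfold Spec_count_mixed_triads; infer_instance

-- ===== CLAIM (what is proved, stated in full; the proofs are below) =====
def Claim_equal_count_mixed_triads : Prop := ∀ (sign : List (Int × Int × Int)) (n_sites : Int), Dom_count_mixed_triads sign n_sites → Spec_count_mixed_triads sign n_sites (count_mixed_triads sign n_sites)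

-- ===== LEMMAS AND PROOFS =====

-- the dict both programs build from the association list
def pdict (sign : List (Int × Int × Int)) : PySem.Dict (Int × Int) Int :=
  PySem.Dict.ofList (sign.map (fun t => ((t.1, t.2.1), t.2.2)))

-- all ordered pairs (earlier, later) of a list, in combinations order
def pairs2 : List Int → List (Int × Int)
  | [] => []
  | x :: xs => xs.map (fun y => (x, y)) ++ pairs2 xs

-- contribution of one triple in A's inner loop
def tri (d : PySem.Dict (Int × Int) Int) (i j k : Int) : Int × Int :=
  if k = i ∨ k = j then (0, 0)
  else if d.contains (i, j) ∧ d.contains (i, k) ∧ d.contains (k, j) then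
    (if d.getD (i, j) 0 ≠ d.getD (i, k) 0 * d.getD (k, j) 0 then 1 else 0, 1)
  else (0, 0)

-- contribution of one neighbour in B's inner loop
def triB (d : PySem.Dict (Int × Int) Int) (n i j s k : Int) : Int × Int :=
  if k ≠ i ∧ k ≠ j ∧ 0 ≤ k ∧ k < n ∧ d.contains (k, j) then
    (if s ≠ d.getD (i, k) 0 * d.getD (k, j) 0 then 1 else 0, 1)
  else (0, 0)

lemma foldl_add_pair {α M : Type} [AddCommMonoid M] (l : List α) (g : α → M) (a : M) :
    l.foldl (fun acc x => acc + g x) a = a + (l.map g).sum := by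
  induction l generalizing a with
  | nil => simp
  | cons x xs ih => simp [ih, add_assoc]

lemma sum_map_filter_zero {α M : Type} [AddCommMonoid M] (l : List α) (p : α → Bool)
    (f : α → M) (h : ∀ x ∈ l, p x = false → f x = 0) :
    (l.map f).sum = ((l.filter p).map f).sum := by
  induction l with
  | nil => simp
  | cons x xs ih =>
    by_cases hp : p x = true
    · simp [hp, ih (fun y hy => h y (List.mem_cons_of_mem _ hy))]
    · simp only [Bool.not_eq_true] at hp
      simp [hp, h x (List.mem_cons_self) hp,
        ih (fun y hy => h y (List.mem_cons_of_mem _ hy))]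

lemma comb2_eq (xs : List Int) :
    PySem.List.combinations xs 2 = (pairs2 xs).map (fun p => [p.1, p.2]) := by
  induction xs with
  | nil => simp [PySem.List.combinations_nil_succ, pairs2]
  | cons x xs ih =>
    rw [show (2 : Nat) = 1 + 1 from rfl, PySem.List.combinations_cons_succ,
      PySem.List.combinations_one]
    simp [pairs2, ih, List.map_map, Function.comp]

lemma fst_mem_pairs2 (xs : List Int) (p : Int × Int) (h : p ∈ pairs2 xs) : p.1 ∈ xs := by
  induction xs with
  | nil => simp [pairs2] at h
  | cons x xs ih =>
    simp only [pairs2, List.mem_append, List.mem_map] at h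
    rcases h with ⟨y, _, rfl⟩ | h
    · simp
    · exact List.mem_cons_of_mem _ (ih h)

lemma mem_pairs2_sorted (xs : List Int) (h : xs.Pairwise (· < ·)) (p : Int × Int) :
    p ∈ pairs2 xs ↔ p.1 ∈ xs ∧ p.2 ∈ xs ∧ p.1 < p.2 := by
  induction xs with
  | nil => simp [pairs2]
  | cons x xs ih =>
    have hx : ∀ y ∈ xs, x < y := fun y hy => (List.pairwise_cons.mp h).1 y hy
    have hxs := (List.pairwise_cons.mp h).2
    simp only [pairs2, List.mem_append, List.mem_map, ih hxs, List.mem_cons]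
    constructor
    · rintro (⟨y, hy, rfl⟩ | ⟨h1, h2, h3⟩)
      · exact ⟨Or.inl rfl, Or.inr hy, hx y hy⟩
      · exact ⟨Or.inr h1, Or.inr h2, h3⟩
    · rintro ⟨h1 | h1, h2 | h2, h3⟩
      · omega
      · exact Or.inl ⟨p.2, h2, by simp [← h1]⟩
      · have := hx p.1 h1; omega
      · exact Or.inr ⟨h1, h2, h3⟩

lemma nodup_pairs2 (xs : List Int) (h : xs.Pairwise (· < ·)) : (pairs2 xs).Nodup := by
  induction xs with
  | nil => simp [pairs2]
  | cons x xs ih =>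
    have hx : ∀ y ∈ xs, x < y := fun y hy => (List.pairwise_cons.mp h).1 y hy
    have hxs := (List.pairwise_cons.mp h).2
    have hnd : xs.Nodup := hxs.imp (fun hab => ne_of_lt hab)
    refine List.Nodup.append ?_ (ih hxs) ?_
    · exact List.Nodup.map (fun a b hab => by simpa using congrArg Prod.snd hab) hnd
    · intro p hp hp2
      obtain ⟨y, hy, rfl⟩ := List.mem_map.mp hp
      exact absurd (hx _ (fst_mem_pairs2 _ _ hp2)) (lt_irrefl x)

-- A's inner loop step adds `tri`
lemma stepA_inner (d : PySem.Dict (Int × Int) Int) (i j : Int) (acc : Int × Int) (k : Int) :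
    (if k = i ∨ k = j then acc
     else if d.contains (i, j) ∧ d.contains (i, k) ∧ d.contains (k, j) then
       (if d.getD (i, j) 0 ≠ d.getD (i, k) 0 * d.getD (k, j) 0 then acc.1 + 1 else acc.1,
        acc.2 + 1)
     else acc) = acc + tri d i j k := by
  unfold tri
  split_ifs with h1 h2 h3 <;> simp [Prod.ext_iff]

-- B's inner loop step adds `triB`
lemma stepB_inner (d : PySem.Dict (Int × Int) Int) (n i j s : Int) (acc : Int × Int) (k : Int) :
    (if k ≠ i ∧ k ≠ j ∧ 0 ≤ k ∧ k < n ∧ d.contains (k, j) then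
       (if s ≠ d.getD (i, k) 0 * d.getD (k, j) 0 then acc.1 + 1 else acc.1, acc.2 + 1)
     else acc) = acc + triB d n i j s k := by
  unfold triB
  split_ifs with h1 h2 <;> simp [Prod.ext_iff]

-- the neighbour lists B builds: out_nbrs[i] = seconds of keys with first = i
lemma adj_getD (d : PySem.Dict (Int × Int) Int) (i : Int) :
    (d.keys.foldl (fun a (p : Int × Int) => a.modify p.1 [] (· ++ [p.2]))
      PySem.Dict.empty).getD i []
      = ((d.keys.filter (fun p => p.1 == i)).map (·.2)) := by
  simpa using PySem.Dict.getD_foldl_modify_append (l := d.keys) (d := PySem.Dict.empty) (c := i)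

-- inner sums agree on an existing edge (i, j) with 0 ≤ i < j < n
lemma inner_eq (d : PySem.Dict (Int × Int) Int) (hnd : d.keys.Nodup) (n i j : Int)
    (hij : d.contains (i, j) = true) :
    ((PySem.List.pyRange 0 n 1).map (tri d i j)).sum
      = ((((d.keys.filter (fun p => p.1 == i)).map (·.2)).map
          (triB d n i j (d.getD (i, j) 0))).sum) := by
  have h1 : ∀ k ∈ PySem.List.pyRange 0 n 1,
      (fun k => d.contains (i, k)) k = false → tri d i j k = 0 := by
    intro k _ hc
    unfold tri
    split_ifs with ha hb h3
    · exact Prod.mk_zero_zero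
    · exact absurd hb.2.1 (by simp [hc])
    · exact absurd hb.2.1 (by simp [hc])
    · exact Prod.mk_zero_zero
  have h2 : ∀ k ∈ (d.keys.filter (fun p => p.1 == i)).map (·.2),
      (fun k => decide (0 ≤ k) && decide (k < n)) k = false →
      triB d n i j (d.getD (i, j) 0) k = 0 := by
    intro k _ hc
    unfold triB
    split_ifs with ha h3
    · obtain ⟨_, _, hb1, hb2, _⟩ := ha
      simp [hb1, hb2] at hc
    · obtain ⟨_, _, hb1, hb2, _⟩ := ha
      simp [hb1, hb2] at hc
    · exact Prod.mk_zero_zero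
  rw [sum_map_filter_zero _ _ _ h1, sum_map_filter_zero _ _ _ h2]
  have hmemkeys : ∀ k : Int, (i, k) ∈ d.keys ↔ d.contains (i, k) = true := by
    intro k; exact (PySem.Dict.contains_iff_mem_keys d (i, k)).symm
  have hperm :
      ((PySem.List.pyRange 0 n 1).filter (fun k => d.contains (i, k))).Perm
        (((d.keys.filter (fun p => p.1 == i)).map (·.2)).filter
          (fun k => decide (0 ≤ k) && decide (k < n))) := by
    apply (List.perm_ext_iff_of_nodup ?_ ?_).mpr
    · intro k
      simp only [List.mem_filter, PySem.List.mem_pyRange_one, List.mem_map]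
      constructor
      · rintro ⟨⟨hk0, hkn⟩, hc⟩
        exact ⟨⟨(i, k), ⟨(hmemkeys k).mpr hc, by simp⟩, rfl⟩, by simp [hk0, hkn]⟩
      · rintro ⟨⟨p, ⟨hpk, hpi⟩, rfl⟩, hb⟩
        have : p.1 = i := by simpa using hpi
        simp only [Bool.and_eq_true, decide_eq_true_eq] at hb
        refine ⟨⟨hb.1, hb.2⟩, (hmemkeys p.2).mp ?_⟩
        rwa [← this, Prod.mk.eta]
    · exact (PySem.List.nodup_pyRange_one 0 n).filter _
    · refine List.Nodup.filter _ (List.Nodup.map_on ?_ (hnd.filter _))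
      intro p hp q hq hpq
      have hpi : p.1 = i := by simpa using (List.mem_filter.mp hp).2
      have hqi : q.1 = i := by simpa using (List.mem_filter.mp hq).2
      exact Prod.ext (hpi.trans hqi.symm) hpq
  calc (((PySem.List.pyRange 0 n 1).filter (fun k => d.contains (i, k))).map
          (tri d i j)).sum
      = ((((d.keys.filter (fun p => p.1 == i)).map (·.2)).filter
          (fun k => decide (0 ≤ k) && decide (k < n))).map (tri d i j)).sum :=
        (hperm.map _).sum_eq
    _ = _ := by
        apply congrArg
        apply List.map_congr_left
        intro k hk
        obtain ⟨hk1, hk2⟩ := List.mem_filter.mp hk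
        simp only [Bool.and_eq_true, decide_eq_true_eq] at hk2
        obtain ⟨p, hp, rfl⟩ := List.mem_map.mp hk1
        obtain ⟨hpk, hpi⟩ := List.mem_filter.mp hp
        have hik : d.contains (i, p.2) = true := by
          apply (hmemkeys p.2).mp
          have : p.1 = i := by simpa using hpi
          rwa [← this, Prod.mk.eta]
        by_cases hki : p.2 = i
        · simp [tri, triB, hki]
        · by_cases hkj2 : p.2 = j
          · simp [tri, triB, hkj2]
          · simp [tri, triB, hki, hkj2, hij, hik, hk2.1, hk2.2]

-- A as a sum of per-pair inner sums
def fA (d : PySem.Dict (Int × Int) Int) (n : Int) (p : Int × Int) : Int × Int :=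
  ((PySem.List.pyRange 0 n 1).map (tri d p.1 p.2)).sum

-- B as a sum of per-item inner sums
def gB (d : PySem.Dict (Int × Int) Int) (n : Int) (it : (Int × Int) × Int) : Int × Int :=
  if 0 ≤ it.1.1 ∧ it.1.1 < it.1.2 ∧ it.1.2 < n then
    (((d.keys.filter (fun p => p.1 == it.1.1)).map (·.2)).map
      (triB d n it.1.1 it.1.2 it.2)).sum
  else 0

lemma A_eq (sign : List (Int × Int × Int)) (n : Int) :
    count_mixed_triads sign n
      = ((pairs2 (PySem.List.pyRange 0 n 1)).map (fA (pdict sign) n)).sum := by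
  unfold count_mixed_triads
  rw [show PySem.Dict.ofList (sign.map (fun t => ((t.1, t.2.1), t.2.2))) = pdict sign from rfl]
  rw [comb2_eq, List.foldl_map]
  have hstep : ∀ (acc : Int × Int) (p : Int × Int), p ∈ pairs2 (PySem.List.pyRange 0 n 1) →
      (PySem.List.pyRange 0 n 1).foldl
        (fun acc k =>
          if k = p.1 ∨ k = p.2 then acc
          else if (pdict sign).contains (p.1, p.2) ∧ (pdict sign).contains (p.1, k) ∧
              (pdict sign).contains (k, p.2) then
            ((if (pdict sign).getD (p.1, p.2) 0 ≠
                (pdict sign).getD (p.1, k) 0 * (pdict sign).getD (k, p.2) 0 then acc.1 + 1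
              else acc.1), acc.2 + 1)
          else acc) acc = acc + fA (pdict sign) n p := by
    intro acc p _
    exact (PySem.List.foldl_congr_mem' _ _
      (fun acc k => acc + tri (pdict sign) p.1 p.2 k) _
      (fun k _ acc => stepA_inner (pdict sign) p.1 p.2 acc k)).trans
      (foldl_add_pair _ _ _)
  refine Eq.trans (PySem.List.foldl_congr_mem' _ _
    (fun acc p => acc + fA (pdict sign) n p) _ (fun p hp acc => hstep acc p hp)) ?_
  rw [foldl_add_pair, Prod.mk_zero_zero, zero_add]

lemma B_eq (sign : List (Int × Int × Int)) (n : Int) :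
    count_mixed_triads_alt sign n = ((pdict sign).items.map (gB (pdict sign) n)).sum := by
  unfold count_mixed_triads_alt
  rw [show PySem.Dict.ofList (sign.map (fun t => ((t.1, t.2.1), t.2.2))) = pdict sign from rfl]
  have hstep : ∀ (acc : Int × Int) (it : (Int × Int) × Int),
      it ∈ (pdict sign).items →
      (if 0 ≤ it.1.1 ∧ it.1.1 < it.1.2 ∧ it.1.2 < n then
        (((pdict sign).keys.foldl (fun a p => a.modify p.1 [] (· ++ [p.2]))
            PySem.Dict.empty).getD it.1.1 []).foldl
          (fun acc k =>
            if k ≠ it.1.1 ∧ k ≠ it.1.2 ∧ 0 ≤ k ∧ k < n ∧ (pdict sign).contains (k, it.1.2) then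
              ((if it.2 ≠ (pdict sign).getD (it.1.1, k) 0 * (pdict sign).getD (k, it.1.2) 0
                then acc.1 + 1 else acc.1), acc.2 + 1)
            else acc) acc
      else acc) = acc + gB (pdict sign) n it := by
    intro acc it _
    unfold gB
    split_ifs with hc
    · rw [adj_getD]
      exact (PySem.List.foldl_congr_mem' _ _
        (fun acc k => acc + triB (pdict sign) n it.1.1 it.1.2 it.2 k) _
        (fun k _ acc => stepB_inner (pdict sign) n it.1.1 it.1.2 it.2 acc k)).trans
        (foldl_add_pair _ _ _)
    · simp
  refine Eq.trans (PySem.List.foldl_congr_mem' _ _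
    (fun acc it => acc + gB (pdict sign) n it) _ (fun it hit acc => hstep acc it hit)) ?_
  rw [foldl_add_pair, Prod.mk_zero_zero, zero_add]

-- ===== VERDICT (by name: the statement is the Claim_ definition above) =====
lemma keys_eq_map_fst_items (d : PySem.Dict (Int × Int) Int) :
    d.keys = d.items.map (·.1) := rfl

theorem count_mixed_triads_spec : Claim_equal_count_mixed_triads := by
  intro sign n _
  unfold Spec_count_mixed_triads
  rw [A_eq, B_eq]
  have hnd : (pdict sign).keys.Nodup := PySem.Dict.nodup_keys_ofList _
  set d := pdict sign with hd
  set R := PySem.List.pyRange 0 n 1 with hR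
  have hitems : d.items.Nodup := List.Nodup.of_map (·.1) (by rw [← keys_eq_map_fst_items]; exact hnd)
  -- drop the pairs without a direct edge from A's sum
  have hA : ((pairs2 R).map (fA d n)).sum
      = (((pairs2 R).filter (fun p => d.contains p)).map (fA d n)).sum := by
    apply sum_map_filter_zero
    intro p _ hc
    have hz : ∀ k ∈ R, tri d p.1 p.2 k = 0 := by
      intro k _
      unfold tri
      split_ifs with ha hb h3
      · exact Prod.mk_zero_zero
      · exact absurd hb.1 (by simp [Prod.mk.eta, hc])
      · exact absurd hb.1 (by simp [Prod.mk.eta, hc])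
      · exact Prod.mk_zero_zero
    unfold fA
    rw [List.map_congr_left hz]
    simp
  -- drop the items outside the bounds from B's sum
  have hB : (d.items.map (gB d n)).sum
      = ((d.items.filter (fun it => decide (0 ≤ it.1.1) && decide (it.1.1 < it.1.2) &&
          decide (it.1.2 < n))).map (gB d n)).sum := by
    apply sum_map_filter_zero
    intro it _ hc
    unfold gB
    split_ifs with ha
    · obtain ⟨h1, h2, h3⟩ := ha
      simp [h1, h2, h3] at hc
    · rfl
  rw [hA, hB]
  -- on surviving items, B's inner sum is A's inner sum
  have hgf : ∀ it ∈ d.items.filter (fun it => decide (0 ≤ it.1.1) &&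
      decide (it.1.1 < it.1.2) && decide (it.1.2 < n)), gB d n it = fA d n it.1 := by
    intro it hit
    obtain ⟨hmem, hcB⟩ := List.mem_filter.mp hit
    simp only [Bool.and_eq_true, decide_eq_true_eq] at hcB
    have hmem' : (it.1, it.2) ∈ d.items := by rwa [Prod.mk.eta]
    have hkey : d.get? it.1 = some it.2 := PySem.Dict.get?_of_mem_items d hmem' hnd
    have hcont : d.contains (it.1.1, it.1.2) = true := by
      rw [Prod.mk.eta, PySem.Dict.contains_eq_isSome_get?, hkey]; rfl
    have hval : d.getD (it.1.1, it.1.2) 0 = it.2 := by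
      rw [Prod.mk.eta]; exact PySem.Dict.getD_of_mem_items d hmem' hnd 0
    unfold gB fA
    rw [if_pos ⟨hcB.1.1, hcB.1.2, hcB.2⟩, ← hval]
    exact (inner_eq d hnd n it.1.1 it.1.2 hcont).symm
  rw [List.map_congr_left hgf, show (fun it => fA d n (Prod.fst it))
      = (fA d n) ∘ (·.1) from rfl, ← List.map_map]
  -- the surviving pairs and the surviving item keys enumerate the same set
  have hperm : ((pairs2 R).filter (fun p => d.contains p)).Perm
      ((d.items.filter (fun it => decide (0 ≤ it.1.1) && decide (it.1.1 < it.1.2) &&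
        decide (it.1.2 < n))).map (·.1)) := by
    apply (List.perm_ext_iff_of_nodup ?_ ?_).mpr
    · intro q
      simp only [List.mem_filter, List.mem_map]
      constructor
      · rintro ⟨hq, hcq⟩
        rw [mem_pairs2_sorted R (by rw [hR]; exact PySem.List.pairwise_lt_pyRange_one 0 n)] at hq
        simp only [hR, PySem.List.mem_pyRange_one] at hq
        have : d.get? q = some (d.getD q 0) := by
          rw [PySem.Dict.contains_eq_isSome_get?] at hcq
          cases hget : d.get? q with
          | none => rw [hget] at hcq; simp at hcq
          | some v => rw [PySem.Dict.getD_of_get?_eq_some d 0 hget]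
        refine ⟨(q, d.getD q 0), ⟨PySem.Dict.mem_items_of_get?_eq_some d this, ?_⟩, rfl⟩
        simp only [Bool.and_eq_true, decide_eq_true_eq]
        exact ⟨⟨hq.1.1, hq.2.2⟩, hq.2.1.2⟩
      · rintro ⟨it, ⟨hmem, hcB⟩, rfl⟩
        simp only [Bool.and_eq_true, decide_eq_true_eq] at hcB
        constructor
        · rw [mem_pairs2_sorted R (by rw [hR]; exact PySem.List.pairwise_lt_pyRange_one 0 n)]
          simp only [hR, PySem.List.mem_pyRange_one]
          refine ⟨⟨hcB.1.1, ?_⟩, ⟨?_, hcB.2⟩, hcB.1.2⟩ <;> omega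
        · have hmem' : (it.1, it.2) ∈ d.items := by rwa [Prod.mk.eta]
          rw [PySem.Dict.contains_eq_isSome_get?, PySem.Dict.get?_of_mem_items d hmem' hnd]
          rfl
    · exact (nodup_pairs2 R (by rw [hR]; exact PySem.List.pairwise_lt_pyRange_one 0 n)).filter _
    · exact List.Nodup.map_on
        (fun x hx y hy hxy => List.inj_on_of_nodup_map
          (by rw [← keys_eq_map_fst_items]; exact hnd)
          (List.mem_of_mem_filter hx) (List.mem_of_mem_filter hy) hxy)
        (hitems.filter _)
  exact (hperm.map (fA d n)).sum_eq
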